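-- pv_equiv track=rewrite | github.com/UTS-eResearch/seafood-collection | open_data_test.py | get_first_month_from_filename
-- ===== SOURCE A (Python) =====
-- MONTHS = ["January","February","March","April","May","June","July","August","September","October","November","December"]
--
-- def get_first_month_from_filename(filename):
--     min_value = None
--     month_name_length = 0
--     for month_name in MONTHS:
--         if month_name in filename:
--             if min_value is None:
--                 min_value = filename.find(month_name)
--                 month_name_length = len(month_name)
--             elif filename.find(month_name) < min_value:
--                 min_value = filename.find(month_name)
--                 month_name_length = len(month_name)
--     if min_value:
--         end_value = min_value + month_name_length
--         return filename[min_value:end_value]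
--     else:
--         return None
-- ===== SOURCE B (Python) =====
-- MONTHS = ["January","February","March","April","May","June","July","August","September","October","November","December"]
--
-- def get_first_month_from_filename(filename):
--     # scan positions left to right; at the first position where any month
--     # name starts, return that month name
--     for i in range(len(filename)):
--         for month_name in MONTHS:
--             if filename[i:i+len(month_name)] == month_name:
--                 return month_name
--     return None
-- ===== Notes on version B (the rewrite author's own statement) =====
-- stated objective: simpler
-- what changed: B scans filename positions left to right and returns the first month name starting at the current position, instead of A's loop over month names maintaining a running minimum find() position and re-slicing at the end.
-- intended difference: On filenames that start with a month name A returns None (its `if min_value:` truthiness test drops match position 0), while B returns that month name, which is the intended earliest-month result. — e.g. on get_first_month_from_filename("May.csv"): A returns none, B returns some "May"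
import Mathlib
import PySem

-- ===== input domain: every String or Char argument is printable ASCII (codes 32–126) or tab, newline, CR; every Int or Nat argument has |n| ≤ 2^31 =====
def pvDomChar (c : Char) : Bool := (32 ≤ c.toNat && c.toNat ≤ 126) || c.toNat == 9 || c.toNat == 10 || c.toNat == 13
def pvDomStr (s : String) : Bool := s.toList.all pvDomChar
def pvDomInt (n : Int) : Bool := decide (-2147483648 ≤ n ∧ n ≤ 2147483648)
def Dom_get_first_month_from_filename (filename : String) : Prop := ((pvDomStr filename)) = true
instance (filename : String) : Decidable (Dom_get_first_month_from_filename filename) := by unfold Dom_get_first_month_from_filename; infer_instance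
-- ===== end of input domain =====

-- B replaces A's month-by-month running-minimum search by a single left-to-right
-- positional scan returning the first month name that starts at the current index (simpler).

-- ===== PORT A =====
def MONTHS : List String :=
  ["January","February","March","April","May","June","July","August","September","October","November","December"]

def get_first_month_from_filename (filename : String) : Option String :=
  let st := MONTHS.foldl (fun (st : Option Int × Int) month_name =>
    if PySem.Str.isIn month_name filename then
      match st.1 with
      | none => (some (PySem.Str.find filename month_name), PySem.Str.len month_name)
      | some mv =>
          if PySem.Str.find filename month_name < mv then
            (some (PySem.Str.find filename month_name), PySem.Str.len month_name)
          else st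
    else st) (none, 0)
  match st.1 with
  | some mv =>
      -- Python `if min_value:` — false for None and for 0
      if mv ≠ 0 then some (PySem.Str.slice filename (some mv) (some (mv + st.2))) else none
  | none => none

-- ===== PORT B =====
def get_first_month_from_filename_alt (filename : String) : Option String :=
  (PySem.List.pyRange 0 (PySem.Str.len filename) 1).findSome? (fun i =>
    MONTHS.find? (fun month_name =>
      PySem.Str.slice filename (some i) (some (i + PySem.Str.len month_name)) == month_name))

-- ===== PRECONDITION & SPEC =====
-- On filenames that start with a month name A returns none (its `if min_value:` test drops
-- match position 0), while B returns that month name, the intended earliest-month result.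
def D_get_first_month_from_filename (filename : String) : Prop :=
  ∃ m ∈ MONTHS, PySem.Str.startswith filename m = true
instance (filename : String) : Decidable (D_get_first_month_from_filename filename) := by
  unfold D_get_first_month_from_filename; infer_instance

def Spec_get_first_month_from_filename (filename : String) (out : Option String) : Prop :=
  ¬ D_get_first_month_from_filename filename → out = get_first_month_from_filename_alt filename
instance (filename : String) (out : Option String) : Decidable (Spec_get_first_month_from_filename filename out) := by
  unfold Spec_get_first_month_from_filename; infer_instance

def pvDiffWitness_get_first_month_from_filename : String := "May.csv"
def pvDiffWitnessOut_get_first_month_from_filename : (Option String) × (Option String) := (none, some "May")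

-- ===== CLAIM (what is proved, stated in full; the proofs are below) =====
def Claim_unchanged_get_first_month_from_filename : Prop := ∀ (filename : String), Dom_get_first_month_from_filename filename → Spec_get_first_month_from_filename filename (get_first_month_from_filename filename)
def Claim_changed_get_first_month_from_filename : Prop := Dom_get_first_month_from_filename (pvDiffWitness_get_first_month_from_filename) ∧ D_get_first_month_from_filename (pvDiffWitness_get_first_month_from_filename) ∧ get_first_month_from_filename (pvDiffWitness_get_first_month_from_filename) = pvDiffWitnessOut_get_first_month_from_filename.1 ∧ get_first_month_from_filename_alt (pvDiffWitness_get_first_month_from_filename) = pvDiffWitnessOut_get_first_month_from_filename.2 ∧ pvDiffWitnessOut_get_first_month_from_filename.1 ≠ pvDiffWitnessOut_get_first_month_from_filename.2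
def Claim_exact_get_first_month_from_filename : Prop := ∀ (filename : String), Dom_get_first_month_from_filename filename → D_get_first_month_from_filename filename → get_first_month_from_filename filename ≠ get_first_month_from_filename_alt filename

-- ===== LEMMAS AND PROOFS =====

-- `pvBest fn ms` names the (position, month) pair A's running-minimum loop ends with.
def pvBest (fn : String) : List String → Option (Int × String)
  | [] => none
  | m :: ms =>
    match pvBest fn ms with
    | none => if PySem.Str.isIn m fn then some (PySem.Str.find fn m, m) else none
    | some (p, w) =>
        if PySem.Str.isIn m fn then
          (if PySem.Str.find fn m ≤ p then some (PySem.Str.find fn m, m) else some (p, w))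
        else some (p, w)

theorem pvFold_some (fn : String) (ms : List String) : ∀ (mv l : Int),
    ms.foldl (fun (st : Option Int × Int) month_name =>
      if PySem.Str.isIn month_name fn then
        match st.1 with
        | none => (some (PySem.Str.find fn month_name), PySem.Str.len month_name)
        | some mv =>
            if PySem.Str.find fn month_name < mv then
              (some (PySem.Str.find fn month_name), PySem.Str.len month_name)
            else st
      else st) (some mv, l)
    = match pvBest fn ms with
      | none => (some mv, l)
      | some (p, w) => if p < mv then (some p, PySem.Str.len w) else (some mv, l) := by
  induction ms with
  | nil => intro mv l; rfl
  | cons m ms ih =>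
    intro mv l
    simp at ih
    rcases hb : pvBest fn ms with _ | ⟨p, w⟩ <;>
      by_cases hIn : PySem.Chars.isIn m.toList fn.toList = true <;>
      by_cases h1 : PySem.Chars.find fn.toList m.toList < mv <;>
      simp [pvBest, hb, hIn, h1, ih] <;> split_ifs <;> simp_all <;> omega

theorem pvFold_none (fn : String) (ms : List String) :
    ms.foldl (fun (st : Option Int × Int) month_name =>
      if PySem.Str.isIn month_name fn then
        match st.1 with
        | none => (some (PySem.Str.find fn month_name), PySem.Str.len month_name)
        | some mv =>
            if PySem.Str.find fn month_name < mv then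
              (some (PySem.Str.find fn month_name), PySem.Str.len month_name)
            else st
      else st) (none, 0)
    = match pvBest fn ms with
      | none => (none, 0)
      | some (p, w) => (some p, PySem.Str.len w) := by
  induction ms with
  | nil => rfl
  | cons m ms ih =>
    have hs := pvFold_some fn ms
    simp at ih hs
    rcases hb : pvBest fn ms with _ | ⟨p, w⟩ <;>
      by_cases hIn : PySem.Chars.isIn m.toList fn.toList = true <;>
      simp [pvBest, hb, hIn, ih, hs] <;> split_ifs <;> simp_all <;> omega

theorem pvBest_none_iff (fn : String) (ms : List String) :
    pvBest fn ms = none ↔ ∀ m ∈ ms, PySem.Str.isIn m fn = false := by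
  induction ms with
  | nil => simp [pvBest]
  | cons m ms ih =>
    rcases hb : pvBest fn ms with _ | ⟨p, w⟩ <;>
      by_cases hIn : PySem.Chars.isIn m.toList fn.toList = true <;>
      simp [pvBest, hb, hIn] <;> simp [hb] at ih <;> (try simp_all) <;> split_ifs <;> simp

theorem pvBest_some (fn : String) (ms : List String) : ∀ (p : Int) (w : String),
    pvBest fn ms = some (p, w) →
      w ∈ ms ∧ PySem.Str.isIn w fn = true ∧ PySem.Str.find fn w = p ∧
        (∀ m ∈ ms, PySem.Str.isIn m fn = true → p ≤ PySem.Str.find fn m) := by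
  induction ms with
  | nil => intro p w h; simp [pvBest] at h
  | cons m ms ih =>
    intro p w h
    rcases hb : pvBest fn ms with _ | ⟨q, v⟩ <;> simp only [pvBest, hb] at h
    · by_cases hIn : PySem.Str.isIn m fn = true
      · rw [if_pos hIn] at h
        obtain ⟨h1, h2⟩ := Prod.mk.injEq .. ▸ (Option.some.injEq .. ▸ h)
        subst h2
        refine ⟨by simp, hIn, h1.symm ▸ rfl, ?_⟩
        intro m' hm' hm'In
        rcases List.mem_cons.mp hm' with rfl | hmem
        · omega
        · have hf := (pvBest_none_iff fn ms).mp hb m' hmem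
          rw [hf] at hm'In; cases hm'In
      · rw [if_neg hIn] at h; cases h
    · obtain ⟨hvmem, hvIn, hvfind, hmin⟩ := ih q v hb
      by_cases hIn : PySem.Str.isIn m fn = true
      · rw [if_pos hIn] at h
        by_cases hle : PySem.Str.find fn m ≤ q
        · rw [if_pos hle] at h
          obtain ⟨h1, h2⟩ := Prod.mk.injEq .. ▸ (Option.some.injEq .. ▸ h)
          subst h2
          refine ⟨by simp, hIn, h1.symm ▸ rfl, ?_⟩
          intro m' hm' hm'In
          rcases List.mem_cons.mp hm' with rfl | hmem
          · omega
          · have := hmin m' hmem hm'In; omega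
        · rw [if_neg hle] at h
          obtain ⟨h1, h2⟩ := Prod.mk.injEq .. ▸ (Option.some.injEq .. ▸ h)
          subst h2
          refine ⟨by simp [hvmem], hvIn, h1 ▸ hvfind, ?_⟩
          intro m' hm' hm'In
          rcases List.mem_cons.mp hm' with rfl | hmem
          · omega
          · have := hmin m' hmem hm'In; omega
      · rw [if_neg hIn] at h
        obtain ⟨h1, h2⟩ := Prod.mk.injEq .. ▸ (Option.some.injEq .. ▸ h)
        subst h2
        refine ⟨by simp [hvmem], hvIn, h1 ▸ hvfind, ?_⟩
        intro m' hm' hm'In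
        rcases List.mem_cons.mp hm' with rfl | hmem
        · exact absurd hm'In hIn
        · have := hmin m' hmem hm'In; omega

theorem pvBest_find? (fn : String) (ms : List String) : ∀ (p : Int) (w : String),
    pvBest fn ms = some (p, w) →
      ms.find? (fun m => PySem.Str.isIn m fn && (PySem.Str.find fn m == p)) = some w := by
  induction ms with
  | nil => intro p w h; simp [pvBest] at h
  | cons m ms ih =>
    intro p w h
    rcases hb : pvBest fn ms with _ | ⟨q, v⟩ <;> simp only [pvBest, hb] at h
    · by_cases hIn : PySem.Str.isIn m fn = true
      · rw [if_pos hIn] at h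
        obtain ⟨h1, h2⟩ := Prod.mk.injEq .. ▸ (Option.some.injEq .. ▸ h)
        subst h2
        rw [List.find?_cons_of_pos (by simp_all)]
      · rw [if_neg hIn] at h; cases h
    · by_cases hIn : PySem.Str.isIn m fn = true
      · rw [if_pos hIn] at h
        by_cases hle : PySem.Str.find fn m ≤ q
        · rw [if_pos hle] at h
          obtain ⟨h1, h2⟩ := Prod.mk.injEq .. ▸ (Option.some.injEq .. ▸ h)
          subst h2
          rw [List.find?_cons_of_pos (by simp_all)]
        · rw [if_neg hle] at h
          obtain ⟨h1, h2⟩ := Prod.mk.injEq .. ▸ (Option.some.injEq .. ▸ h)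
          subst h2; subst h1
          rw [List.find?_cons_of_neg (by simp_all; omega)]
          exact ih q v hb
      · rw [if_neg hIn] at h
        obtain ⟨h1, h2⟩ := Prod.mk.injEq .. ▸ (Option.some.injEq .. ▸ h)
        subst h2; subst h1
        rw [List.find?_cons_of_neg (by simp_all)]
        exact ih q v hb

theorem pvSlice_eq_iff (fn m : String) (i : Int) (hi : 0 ≤ i) :
    (PySem.Str.slice fn (some i) (some (i + PySem.Str.len m)) == m)
    = decide (m.toList <+: fn.toList.drop i.toNat) := by
  have hlen : PySem.Str.len m = (m.toList.length : Int) := PySem.Str.len_eq m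
  have harith : (i + (m.toList.length : Int)).toNat - i.toNat = m.toList.length := by omega
  rw [Bool.eq_iff_iff, beq_iff_eq, decide_eq_true_iff]
  constructor
  · intro h
    have := congrArg String.toList h
    rw [PySem.Str.toList_slice] at this
    rw [PySem.Chars.slice_eq_listSlice, hlen,
      PySem.List.slice_toNat _ hi (by omega), harith] at this
    exact List.prefix_iff_eq_take.mpr this.symm
  · intro h
    apply String.toList_inj.mp
    rw [PySem.Str.toList_slice, PySem.Chars.slice_eq_listSlice, hlen,
      PySem.List.slice_toNat _ hi (by omega), harith]
    exact (List.prefix_iff_eq_take.mp h).symm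

theorem pvFind?_congr {α : Type} (p q : α → Bool) (l : List α)
    (h : ∀ x ∈ l, p x = q x) : l.find? p = l.find? q := by
  induction l with
  | nil => rfl
  | cons a l ih =>
    simp only [List.find?, h a (by simp)]
    rcases hq : q a <;> simp [ih fun x hx => h x (by simp [hx])]

theorem pvMonths_ne_nil : ∀ m ∈ MONTHS, m.toList ≠ [] := by decide

-- A, re-expressed through pvBest
theorem pvA_eq (fn : String) :
    get_first_month_from_filename fn
    = match pvBest fn MONTHS with
      | none => none
      | some (p, w) =>
          if p ≠ 0 then some (PySem.Str.slice fn (some p) (some (p + PySem.Str.len w))) else none := by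
  simp only [get_first_month_from_filename]
  rw [pvFold_none fn MONTHS]
  rcases h : pvBest fn MONTHS with _ | ⟨p, w⟩ <;> simp

-- a prefix occurrence is an infix occurrence of the whole string
theorem pvPrefix_drop_infix (m l : List Char) (k : Nat) (h : m <+: l.drop k) :
    m <:+: l := h.isInfix.trans (List.drop_suffix _ _).isInfix

-- `find` bracketing: an occurrence at k bounds find from above
theorem pvFind_le_of_prefix (l m : List Char) (k : Nat) (h : m <+: l.drop k) :
    PySem.Chars.find l m ≤ (k : Int) := by
  have hf0 : 0 ≤ PySem.Chars.find l m :=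
    (PySem.Chars.find_nonneg_iff _ _).mpr (pvPrefix_drop_infix m l k h)
  have hspec := PySem.Chars.find_spec (s := l) (sub := m) hf0
  have : ¬ k < (PySem.Chars.find l m).toNat := fun hlt => hspec.2 _ hlt h
  omega

-- the per-position month test of B, rewritten as A's (contained ∧ find = p) test,
-- valid at the overall minimum position p
theorem pvPred_eq_at_min (fn : String) (p : Int) (hp0 : 0 ≤ p)
    (hmin : ∀ m ∈ MONTHS, PySem.Str.isIn m fn = true → p ≤ PySem.Str.find fn m) :
    ∀ m ∈ MONTHS,
      (PySem.Str.slice fn (some p) (some (p + PySem.Str.len m)) == m)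
      = (PySem.Str.isIn m fn && (PySem.Str.find fn m == p)) := by
  intro m hm
  rw [pvSlice_eq_iff fn m p hp0, Bool.eq_iff_iff]
  simp only [decide_eq_true_eq, Bool.and_eq_true, beq_iff_eq]
  constructor
  · intro hpre
    have hinf := pvPrefix_drop_infix _ _ _ hpre
    have hIn : PySem.Str.isIn m fn = true := by
      rw [PySem.Str.isIn_eq]; exact (PySem.Chars.isIn_iff_infix _ _).mpr hinf
    have h1 := hmin m hm hIn
    have h2 := pvFind_le_of_prefix fn.toList m.toList p.toNat hpre
    rw [PySem.Str.find_eq] at h1 ⊢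
    exact ⟨hIn, by omega⟩
  · rintro ⟨hIn, hfeq⟩
    rw [PySem.Str.find_eq] at hfeq
    have hspec := PySem.Chars.find_spec (s := fn.toList) (sub := m.toList) (by omega)
    rw [hfeq] at hspec
    exact hspec.1

-- at positions before the minimum, no month starts: B's find? returns none there
theorem pvNone_before_min (fn : String) (p : Int)
    (hmin : ∀ m ∈ MONTHS, PySem.Str.isIn m fn = true → p ≤ PySem.Str.find fn m)
    (i : Int) (hi0 : 0 ≤ i) (hip : i < p) :
    MONTHS.find? (fun month_name =>
      PySem.Str.slice fn (some i) (some (i + PySem.Str.len month_name)) == month_name) = none := by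
  apply List.find?_eq_none.mpr
  intro m hm
  rw [pvSlice_eq_iff fn m i hi0]
  simp only [decide_eq_true_eq]
  intro hpre
  have hinf := pvPrefix_drop_infix _ _ _ hpre
  have hIn : PySem.Str.isIn m fn = true := by
    rw [PySem.Str.isIn_eq]; exact (PySem.Chars.isIn_iff_infix _ _).mpr hinf
  have h1 := hmin m hm hIn
  have h2 := pvFind_le_of_prefix fn.toList m.toList i.toNat hpre
  rw [PySem.Str.find_eq] at h1
  omega

-- ===== VERDICT (by name: the statement is the Claim_ definition above) =====
theorem get_first_month_from_filename_spec : Claim_unchanged_get_first_month_from_filename := by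
  intro fn _ hD
  rcases hbest : pvBest fn MONTHS with _ | ⟨p, w⟩
  · rw [pvA_eq, hbest]
    show (none : Option String) = get_first_month_from_filename_alt fn
    symm
    unfold get_first_month_from_filename_alt
    apply List.findSome?_eq_none_iff.mpr
    intro i hi
    have hi0 : 0 ≤ i := (PySem.List.mem_pyRange_one.mp hi).1
    apply List.find?_eq_none.mpr
    intro m hm
    rw [pvSlice_eq_iff fn m i hi0]
    simp only [decide_eq_true_eq]
    intro hpre
    have hinf := pvPrefix_drop_infix _ _ _ hpre
    have hIn := (pvBest_none_iff fn MONTHS).mp hbest m hm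
    rw [PySem.Str.isIn_eq, (PySem.Chars.isIn_iff_infix _ _).mpr hinf] at hIn
    cases hIn
  · rw [pvA_eq, hbest]
    show (if p ≠ 0 then some (PySem.Str.slice fn (some p) (some (p + PySem.Str.len w))) else none)
      = get_first_month_from_filename_alt fn
    obtain ⟨hwmem, hwIn, hwfind, hmin⟩ := pvBest_some fn MONTHS p w hbest
    have hwinf : w.toList <:+: fn.toList := by
      rw [PySem.Str.isIn_eq] at hwIn
      exact (PySem.Chars.isIn_iff_infix _ _).mp hwIn
    have hfind_c : PySem.Chars.find fn.toList w.toList = p := by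
      rw [← PySem.Str.find_eq]; exact hwfind
    have hp0 : 0 ≤ p := by
      rw [← hfind_c]; exact (PySem.Chars.find_nonneg_iff _ _).mpr hwinf
    have hspec := PySem.Chars.find_spec (s := fn.toList) (sub := w.toList) (by omega)
    rw [hfind_c] at hspec
    have hpre : w.toList <+: fn.toList.drop p.toNat := hspec.1
    have hpne : p ≠ 0 := by
      intro h0
      apply hD
      have : D_get_first_month_from_filename fn := by
        unfold D_get_first_month_from_filename
        refine ⟨w, hwmem, ?_⟩
        rw [PySem.Str.startswith_eq]
        apply (PySem.Chars.startswith_iff _ _).mpr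
        simpa [h0] using hpre
      exact this
    rw [if_pos hpne]
    have hslice : PySem.Str.slice fn (some p) (some (p + PySem.Str.len w)) = w := by
      have h2 : (PySem.Str.slice fn (some p) (some (p + PySem.Str.len w)) == w) = true := by
        rw [pvSlice_eq_iff fn w p hp0]; simpa using hpre
      exact eq_of_beq h2
    rw [hslice]
    unfold get_first_month_from_filename_alt
    have hwne := pvMonths_ne_nil w hwmem
    have hnlen : p < (fn.toList.length : Int) := by
      by_contra hge
      rw [not_lt] at hge
      have hnil : fn.toList.drop p.toNat = [] := List.drop_eq_nil_iff.mpr (by omega)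
      rw [hnil] at hpre
      exact hwne (List.prefix_nil.mp hpre)
    rw [PySem.Str.len_eq]
    rw [PySem.List.pyRange_one_append 0 p _ hp0 (by omega)]
    rw [List.findSome?_append]
    have hfirst : (PySem.List.pyRange 0 p 1).findSome? (fun i =>
        MONTHS.find? fun month_name =>
          PySem.Str.slice fn (some i) (some (i + PySem.Str.len month_name)) == month_name) = none := by
      apply List.findSome?_eq_none_iff.mpr
      intro i hi
      obtain ⟨hi0, hip⟩ := PySem.List.mem_pyRange_one.mp hi
      exact pvNone_before_min fn p hmin i hi0 hip
    rw [hfirst]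
    rw [PySem.List.pyRange_one_cons hnlen]
    rw [List.findSome?_cons]
    have hg : MONTHS.find? (fun month_name =>
        PySem.Str.slice fn (some p) (some (p + PySem.Str.len month_name)) == month_name) = some w := by
      rw [pvFind?_congr _ _ _ (pvPred_eq_at_min fn p hp0 hmin)]
      exact pvBest_find? fn MONTHS p w hbest
    rw [hg]
    rfl
theorem get_first_month_from_filename_changed : Claim_changed_get_first_month_from_filename := by
  unfold Claim_changed_get_first_month_from_filename; decide
theorem get_first_month_from_filename_tight : Claim_exact_get_first_month_from_filename := by
  intro fn _ hD
  obtain ⟨m₀, hm₀, hsw⟩ := hD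
  have hpre0 : m₀.toList <+: fn.toList := by
    rw [PySem.Str.startswith_eq] at hsw
    exact (PySem.Chars.startswith_iff _ _).mp hsw
  have hIn₀ : PySem.Str.isIn m₀ fn = true := by
    rw [PySem.Str.isIn_eq]
    exact (PySem.Chars.isIn_iff_infix _ _).mpr hpre0.isInfix
  have hA : get_first_month_from_filename fn = none := by
    rw [pvA_eq]
    rcases hbest : pvBest fn MONTHS with _ | ⟨p, w⟩
    · rfl
    · obtain ⟨hwmem, hwIn, hwfind, hmin⟩ := pvBest_some fn MONTHS p w hbest
      have hle0 : PySem.Chars.find fn.toList m₀.toList ≤ 0 :=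
        pvFind_le_of_prefix fn.toList m₀.toList 0 (by simpa using hpre0)
      have h1 := hmin m₀ hm₀ hIn₀
      rw [PySem.Str.find_eq] at h1
      have hwinf : w.toList <:+: fn.toList := by
        rw [PySem.Str.isIn_eq] at hwIn
        exact (PySem.Chars.isIn_iff_infix _ _).mp hwIn
      have hp0 : 0 ≤ p := by
        rw [← show PySem.Chars.find fn.toList w.toList = p from
          (by rw [← PySem.Str.find_eq]; exact hwfind)]
        exact (PySem.Chars.find_nonneg_iff _ _).mpr hwinf
      have : p = 0 := by omega
      simp [this]
  rw [hA]
  unfold get_first_month_from_filename_alt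
  have hne : fn.toList ≠ [] := by
    intro h
    rw [h] at hpre0
    exact pvMonths_ne_nil m₀ hm₀ (List.prefix_nil.mp hpre0)
  have hlen0 : (0 : Int) < (fn.toList.length : Int) := by
    have := List.length_pos_iff.mpr hne
    omega
  rw [PySem.Str.len_eq, PySem.List.pyRange_one_cons hlen0, List.findSome?_cons]
  have hsome : (MONTHS.find? (fun month_name =>
      PySem.Str.slice fn (some 0) (some (0 + PySem.Str.len month_name)) == month_name)).isSome := by
    apply List.find?_isSome.mpr
    refine ⟨m₀, hm₀, ?_⟩
    rw [pvSlice_eq_iff fn m₀ 0 le_rfl]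
    simpa using hpre0
  obtain ⟨v, hv⟩ := Option.isSome_iff_exists.mp hsome
  rw [hv]
  simp
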